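-- pv_equiv track=rewrite | github.com/raeez/chiral-bar-cobar | compute/lib/bar_cohomology_dimensions.py | _w3_states_at_weight
-- ===== SOURCE A (Python) =====
-- from typing import Dict, List, Optional, Tuple, Any
--
-- def _w3_states_at_weight(h: int) -> List[str]:
--     """States of the W_3 algebra at weight h.
--
--     Generators: T (weight 2), W (weight 3).
--     Modes: L_{-n} (n >= 2), W_{-m} (m >= 3).
--     PBW states at weight h: all normally ordered products of these modes
--     with total weight h.
--
--     We represent states as sorted tuples of (type, level):
--     type 'L' for Virasoro, 'W' for W-current.
--     PBW order: (level DESC, type DESC where W > L).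
--     """
--     def _gen_w3_states(remaining, max_pair):
--         """Generate W_3 PBW states."""
--         if remaining == 0:
--             yield ()
--             return
--         # Iterate over possible next mode
--         for level in range(min(remaining, max_pair[1] if max_pair else remaining), 1, -1):
--             for mtype in (['W', 'L'] if level >= 3 else ['L'] if level >= 2 else []):
--                 if max_pair and (mtype, level) > max_pair:
--                     continue
--                 pair = (mtype, level)
--                 for rest in _gen_w3_states(remaining - level, pair):
--                     yield (pair,) + rest
--
--     states = list(_gen_w3_states(h, None))
--     labels = []
--     for s in states:
--         parts = [f"{t}{lev}" for t, lev in s]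
--         labels.append("_".join(parts) if parts else "|0>")
--     return labels
-- ===== SOURCE B (Python) =====
-- def _w3_states_at_weight(h: int) -> list:
--     """Enumerate-then-sort: bottom-up tables of integer partitions (PW[n]: parts >= 3,
--     PL[n]: parts >= 2, both non-increasing), a state = W-partition followed by an
--     L-partition whose largest part is at most the smallest W part; all states are
--     collected and then sorted by the scalar key (level desc, 'W' before 'L')."""
--     N = max(h, 0)
--     PW = [[[]]]  # PW[0]
--     PL = [[[]]]  # PL[0]
--     for n in range(1, N + 1):
--         rowW = []
--         for p in range(n, 2, -1):  # parts >= 3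
--             for rest in PW[n - p]:
--                 if not rest or rest[0] <= p:
--                     rowW.append([p] + rest)
--         PW.append(rowW)
--         rowL = []
--         for p in range(n, 1, -1):  # parts >= 2
--             for rest in PL[n - p]:
--                 if not rest or rest[0] <= p:
--                     rowL.append([p] + rest)
--         PL.append(rowL)
--     states = []
--     for a in range(0, h + 1):
--         for wp in PW[a]:
--             cap = wp[-1] if wp else h - a
--             wpairs = [('W', l) for l in wp]
--             for lp in PL[h - a]:
--                 if not lp or lp[0] <= cap:
--                     states.append(wpairs + [('L', l) for l in lp])
--     # scalar key -2*l + (t == 'L') orders pairs by level descending, 'W' before 'L'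
--     states.sort(key=lambda s: [-2 * l + (t == 'L') for (t, l) in s])
--     return ["_".join(f"{t}{l}" for t, l in s) if s else "|0>" for s in states]
-- ===== Notes on version B (the rewrite author's own statement) =====
-- stated objective: alternative
-- what changed: Replaces A's order-producing top-down DFS over capped next modes by an enumerate-then-sort decomposition: every state is built as a pair of integer partitions (W-parts >= 3, then L-parts >= 2 capped by the smallest W part) and the whole collection is then sorted by the scalar key (level desc, W before L).
import Mathlib
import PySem

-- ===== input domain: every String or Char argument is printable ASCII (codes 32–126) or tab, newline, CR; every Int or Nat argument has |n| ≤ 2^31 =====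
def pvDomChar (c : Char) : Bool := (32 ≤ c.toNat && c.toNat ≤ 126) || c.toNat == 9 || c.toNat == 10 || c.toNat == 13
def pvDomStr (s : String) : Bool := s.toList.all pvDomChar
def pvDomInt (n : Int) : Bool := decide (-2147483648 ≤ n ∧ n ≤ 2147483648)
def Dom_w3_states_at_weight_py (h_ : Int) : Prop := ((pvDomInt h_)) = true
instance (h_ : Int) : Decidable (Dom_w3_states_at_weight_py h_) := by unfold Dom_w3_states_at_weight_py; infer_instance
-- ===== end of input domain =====

-- B replaces A's order-producing top-down DFS by enumerate-then-sort: states are built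
-- as pairs of integer partitions (W-parts >= 3 then L-parts >= 2 capped by the smallest
-- W part) and the collection is sorted by a scalar key (level desc, W before L).


-- ===== PORT A =====

-- Python tuple comparison `(mtype, level) > max_pair`; Python str '<' IS Lean String '<' (PySem).
def pyPairGt (a b : String × Int) : Bool :=
  decide (b.1 < a.1) || (a.1 == b.1 && decide (b.2 < a.2))

-- `['W', 'L'] if level >= 3 else ['L'] if level >= 2 else []`
def typesA (level : Int) : List String :=
  if 3 ≤ level then ["W", "L"] else if 2 ≤ level then ["L"] else []

-- the inner generator `_gen_w3_states(remaining, max_pair)` (`.attach` only for termination)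
def genA (remaining : Int) (maxPair : Option (String × Int)) : List (List (String × Int)) :=
  if remaining = 0 then [[]]
  else
    (PySem.List.pyRange
        (min remaining (match maxPair with | some c => c.2 | none => remaining)) 1 (-1)).attach.flatMap
      (fun lv =>
        (typesA lv.1).flatMap (fun mtype =>
          if (match maxPair with | some c => pyPairGt (mtype, lv.1) c | none => false) then []
          else (genA (remaining - lv.1) (some (mtype, lv.1))).map (fun rest => (mtype, lv.1) :: rest)))
termination_by remaining.toNat
decreasing_by
  have h := lv.2
  rw [PySem.List.mem_pyRange_neg_one] at h
  omega

def w3_states_at_weight_py (h_ : Int) : List String :=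
  (genA h_ none).foldl
    (fun labels s =>
      let parts := s.map (fun p => p.1 ++ PySem.Int.toStr p.2)
      labels ++ [if parts ≠ [] then PySem.Str.join "_" parts else "|0>"]) []

-- ===== PORT B =====

-- the sort key `[-2*l + (t == 'L') for (t, l) in s]`
def keyB (s : List (String × Int)) : List Int :=
  s.map (fun p => -2 * p.2 + (if p.1 == "L" then 1 else 0))

-- `not rest or rest[0] <= c`
def pvNotOrLe (c : Int) (rest : List Int) : Bool :=
  match rest with | [] => true | x :: _ => decide (x ≤ c)

-- the bottom-up loop building the partition tables PW (parts >= 3) and PL (parts >= 2);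
-- `PW[n - p]` is ported as pyGetD with default [] (the index is always in range)
def pvTablesB (N : Int) : List (List (List Int)) × List (List (List Int)) :=
  (PySem.List.pyRange 1 (N + 1) 1).foldl
    (fun (t : List (List (List Int)) × List (List (List Int))) n =>
      let rowW := (PySem.List.pyRange n 2 (-1)).flatMap (fun p =>
        ((PySem.List.pyGetD t.1 (n - p) []).filter (pvNotOrLe p)).map
          (fun rest => p :: rest))
      let rowL := (PySem.List.pyRange n 1 (-1)).flatMap (fun p =>
        ((PySem.List.pyGetD t.2 (n - p) []).filter (pvNotOrLe p)).map
          (fun rest => p :: rest))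
      (t.1 ++ [rowW], t.2 ++ [rowL]))
    ([[[]]], [[[]]])

-- the `states` list built from the tables (N = max(h, 0))
def pvStatesPortB (h : Int) : List (List (String × Int)) :=
  (PySem.List.pyRange 0 (h + 1) 1).flatMap (fun a =>
    (PySem.List.pyGetD (pvTablesB (max h 0)).1 a []).flatMap (fun wp =>
      ((PySem.List.pyGetD (pvTablesB (max h 0)).2 (h - a) []).filter
        (pvNotOrLe (match wp.getLast? with | some w => w | none => h - a))).map
        (fun lp => wp.map (fun l => ("W", l)) ++ lp.map (fun l => ("L", l)))))

def w3_states_at_weight_py_alt (h_ : Int) : List String :=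
  (PySem.List.sorted (pvStatesPortB h_) keyB false).map
    (fun s => if s ≠ [] then PySem.Str.join "_" (s.map (fun p => p.1 ++ PySem.Int.toStr p.2)) else "|0>")

-- ===== PRECONDITION & SPEC =====
def Spec_w3_states_at_weight_py (h_ : Int) (out : List String) : Prop := out = w3_states_at_weight_py_alt h_
instance (h_ : Int) (out : List String) : Decidable (Spec_w3_states_at_weight_py h_ out) := by unfold Spec_w3_states_at_weight_py; infer_instance

-- ===== CLAIM (what is proved, stated in full; the proofs are below) =====
def Claim_equal_w3_states_at_weight_py : Prop := ∀ (h_ : Int), Dom_w3_states_at_weight_py h_ → Spec_w3_states_at_weight_py h_ (w3_states_at_weight_py h_)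

-- ===== LEMMAS AND PROOFS =====

-- attach-free unfolding of genA
theorem genA_eq (r : Int) (cap : Option (String × Int)) :
    genA r cap = if r = 0 then [[]]
      else
        (PySem.List.pyRange (min r (match cap with | some c => c.2 | none => r)) 1 (-1)).flatMap
          (fun level =>
            (typesA level).flatMap (fun mtype =>
              if (match cap with | some c => pyPairGt (mtype, level) c | none => false) then []
              else (genA (r - level) (some (mtype, level))).map (fun rest => (mtype, level) :: rest))) := by
  rw [genA.eq_def]
  split
  · rfl
  · simp only [List.flatMap_subtype, List.unattach_attach]

-- attach-free, guard-free unfolding of partsB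
-- proof-side pure form of one table row: partitions of n into parts > b, non-increasing
-- (`.attach` and the 1 ≤ p guard only for termination; both uses have b ≥ 1, so p ≥ 2 there)
def rowP (b n : Int) : List (List Int) :=
  if n = 0 then [[]]
  else
    (PySem.List.pyRange n b (-1)).attach.flatMap
      (fun p =>
        if _hpos : 1 ≤ p.1 then
          ((rowP b (n - p.1)).filter (pvNotOrLe p.1)).map (fun rest => p.1 :: rest)
        else [])
termination_by n.toNat
decreasing_by
  have h := p.2
  rw [PySem.List.mem_pyRange_neg_one] at h
  omega

-- attach-free, guard-free unfolding of rowP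
theorem rowP_eq (b n : Int) (hb : 1 ≤ b) :
    rowP b n = if n = 0 then [[]]
      else
        (PySem.List.pyRange n b (-1)).flatMap
          (fun p =>
            ((rowP b (n - p)).filter (pvNotOrLe p)).map (fun rest => p :: rest)) := by
  rw [rowP.eq_def]
  split
  · rfl
  · refine Eq.trans (List.flatMap_congr (g := fun (p : {x // x ∈ PySem.List.pyRange n b (-1)}) =>
      ((rowP b (n - p.1)).filter (pvNotOrLe p.1)).map (fun rest => p.1 :: rest)) ?_) ?_
    · intro a _
      have h := a.2
      rw [PySem.List.mem_pyRange_neg_one] at h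
      rw [dif_pos (by omega)]
    · simp only [List.flatMap_subtype, List.unattach_attach]

def okA (cap : Option (String × Int)) (r : Int) (p : String × Int) : Prop :=
  2 ≤ p.2 ∧ p.2 ≤ r ∧ (p.1 = "W" ∧ 3 ≤ p.2 ∨ p.1 = "L") ∧
    ∀ c, cap = some c → p.2 ≤ c.2 ∧ pyPairGt p c = false

inductive ValidA : Option (String × Int) → Int → List (String × Int) → Prop
  | nil (cap) : ValidA cap 0 []
  | cons (cap r p s) : okA cap r p → ValidA (some p) (r - p.2) s → ValidA cap r (p :: s)

theorem validA_zero (cap : Option (String × Int)) (s : List (String × Int)) :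
    ValidA cap 0 s ↔ s = [] := by
  constructor
  · intro v
    cases v with
    | nil => rfl
    | cons _ _ p s hok _ => exact absurd hok.2.1 (by have := hok.1; omega)
  · rintro rfl; exact ValidA.nil cap

theorem mem_genA : ∀ (n : Nat) (r : Int), r.toNat = n → ∀ cap s, (s ∈ genA r cap ↔ ValidA cap r s) := by
  intro n
  induction n using Nat.strong_induction_on with
  | _ n IH =>
    intro r hn cap s
    rw [genA_eq]
    by_cases hr : r = 0
    · subst hr
      rw [if_pos rfl, List.mem_singleton, validA_zero]
    · rw [if_neg hr]
      simp only [List.mem_flatMap, PySem.List.mem_pyRange_neg_one]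
      constructor
      · rintro ⟨level, ⟨hl1, hl2⟩, mtype, hmt, hs⟩
        have hty : mtype = "W" ∧ 3 ≤ level ∨ mtype = "L" := by
          unfold typesA at hmt
          by_cases h3 : (3:Int) ≤ level
          · rw [if_pos h3] at hmt
            simp only [List.mem_cons, List.not_mem_nil, or_false] at hmt
            rcases hmt with h | h
            · exact Or.inl ⟨h, h3⟩
            · exact Or.inr h
          · rw [if_neg h3] at hmt
            by_cases h2' : (2:Int) ≤ level
            · rw [if_pos h2'] at hmt
              simp only [List.mem_cons, List.not_mem_nil, or_false] at hmt
              exact Or.inr hmt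
            · rw [if_neg h2'] at hmt
              exact absurd hmt List.not_mem_nil
        cases cap with
        | none =>
          rw [le_min_iff] at hl2
          rw [if_neg (by simp), List.mem_map] at hs
          obtain ⟨rest, hrest, rfl⟩ := hs
          exact ValidA.cons _ r (mtype, level) rest ⟨by omega, hl2.1, hty, by simp⟩
            ((IH (r - level).toNat (by omega) (r - level) rfl _ rest).mp hrest)
        | some c =>
          rw [le_min_iff] at hl2
          by_cases hg : pyPairGt (mtype, level) c = true
          · rw [if_pos hg] at hs
            exact absurd hs List.not_mem_nil
          · rw [if_neg hg, List.mem_map] at hs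
            obtain ⟨rest, hrest, rfl⟩ := hs
            refine ValidA.cons _ r (mtype, level) rest ⟨by omega, hl2.1, hty, ?_⟩
              ((IH (r - level).toNat (by omega) (r - level) rfl _ rest).mp hrest)
            rintro c' hc'
            injection hc' with h
            subst h
            exact ⟨hl2.2, by simpa using hg⟩
      · intro v
        cases v with
        | nil => exact absurd rfl hr
        | cons _ _ p s' hok hv =>
          obtain ⟨h2, hle, hty, hcap⟩ := hok
          refine ⟨p.2, ⟨by omega, ?_⟩, p.1, ?_, ?_⟩
          · rw [le_min_iff]
            refine ⟨hle, ?_⟩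
            cases cap with
            | none => exact hle
            | some c => exact (hcap c rfl).1
          · unfold typesA
            rcases hty with ⟨hw, h3⟩ | hl
            · rw [if_pos h3, hw]; simp
            · rw [hl]
              by_cases h3 : (3:Int) ≤ p.2
              · rw [if_pos h3]; simp
              · rw [if_neg h3, if_pos h2]; simp
          · cases cap with
            | none =>
              rw [if_neg (by simp), List.mem_map]
              exact ⟨s', (IH (r - p.2).toNat (by omega) (r - p.2) rfl (some (p.1, p.2)) s').mpr hv, rfl⟩
            | some c =>
              rw [if_neg (by simp [(hcap c rfl).2]), List.mem_map]
              exact ⟨s', (IH (r - p.2).toNat (by omega) (r - p.2) rfl (some (p.1, p.2)) s').mpr hv, rfl⟩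

theorem pairwise_flatMap' {α β : Type} {R : β → β → Prop} (l : List α) (f : α → List β)
    (h1 : ∀ a ∈ l, (f a).Pairwise R)
    (h2 : l.Pairwise (fun a b => ∀ x ∈ f a, ∀ y ∈ f b, R x y)) :
    (l.flatMap f).Pairwise R := by
  rw [List.flatMap_def, List.pairwise_flatten]
  constructor
  · intro x hx
    rw [List.mem_map] at hx
    obtain ⟨a, ha, rfl⟩ := hx
    exact h1 a ha
  · rw [List.pairwise_map]
    exact h2

-- every member of the (level, mtype)-branch starts with the pair (mtype, level)
theorem mem_branch_shape {r level : Int} {cap : Option (String × Int)} {mtype : String}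
    {x : List (String × Int)}
    (hx : x ∈ (if (match cap with | some c => pyPairGt (mtype, level) c | none => false) then []
      else (genA (r - level) (some (mtype, level))).map (fun rest => (mtype, level) :: rest))) :
    ∃ rest, x = (mtype, level) :: rest := by
  split at hx <;> split at hx
  · exact absurd hx List.not_mem_nil
  · rw [List.mem_map] at hx
    obtain ⟨rest, _, rfl⟩ := hx
    exact ⟨rest, rfl⟩
  · exact absurd hx List.not_mem_nil
  · rw [List.mem_map] at hx
    obtain ⟨rest, _, rfl⟩ := hx
    exact ⟨rest, rfl⟩

theorem keyB_cons (p : String × Int) (s : List (String × Int)) :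
    keyB (p :: s) = (-2 * p.2 + (if p.1 == "L" then 1 else 0)) :: keyB s := rfl

theorem ite_L_bounds (t : String) :
    (0:Int) ≤ (if t == "L" then (1:Int) else 0) ∧ (if t == "L" then (1:Int) else 0) ≤ 1 := by
  split <;> omega

theorem pairwise_gt_pyRange_neg_one (a b : Int) :
    (PySem.List.pyRange a b (-1)).Pairwise (fun x y => y < x) := by
  rw [PySem.List.pyRange_neg_one, List.pairwise_map]
  exact List.Pairwise.imp (fun h => by omega) List.pairwise_lt_range

theorem genA_pairwise : ∀ (n : Nat) (r : Int), r.toNat = n → ∀ cap,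
    (genA r cap).Pairwise (fun s t => keyB s < keyB t) := by
  intro n
  induction n using Nat.strong_induction_on with
  | _ n IH =>
    intro r hn cap
    rw [genA_eq]
    by_cases hr : r = 0
    · rw [if_pos hr]; simp
    · rw [if_neg hr]
      apply pairwise_flatMap'
      · intro level hlevel
        rw [PySem.List.mem_pyRange_neg_one, le_min_iff] at hlevel
        apply pairwise_flatMap'
        · intro mtype _
          have hp : ((genA (r - level) (some (mtype, level))).map
              (fun rest => (mtype, level) :: rest)).Pairwise (fun s t => keyB s < keyB t) := by
            rw [List.pairwise_map]
            refine List.Pairwise.imp ?_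
              (IH (r - level).toNat (by omega) (r - level) rfl (some (mtype, level)))
            intro s t hst
            rw [keyB_cons, keyB_cons]
            exact List.cons_lt_cons_iff.mpr (Or.inr ⟨rfl, hst⟩)
          split <;> split
          · exact List.Pairwise.nil
          · exact hp
          · exact List.Pairwise.nil
          · exact hp
        · -- within a level: 'W' before 'L'
          unfold typesA
          by_cases h3 : (3:Int) ≤ level
          · rw [if_pos h3]
            refine List.Pairwise.cons ?_ (List.Pairwise.cons (by simp) List.Pairwise.nil)
            intro t2 ht2 x hx y hy
            simp only [List.mem_cons, List.not_mem_nil, or_false] at ht2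
            subst ht2
            obtain ⟨rx, rfl⟩ := mem_branch_shape hx
            obtain ⟨ry, rfl⟩ := mem_branch_shape hy
            rw [keyB_cons, keyB_cons]
            exact List.cons_lt_cons_iff.mpr (Or.inl (by simp))
          · rw [if_neg h3]
            by_cases h2 : (2:Int) ≤ level
            · rw [if_pos h2]
              exact List.Pairwise.cons (by simp) List.Pairwise.nil
            · rw [if_neg h2]
              exact List.Pairwise.nil
      · -- across levels: level descending, keys ascending
        refine List.Pairwise.imp ?_ (pairwise_gt_pyRange_neg_one _ _)
        intro l1 l2 hgt x hx y hy
        rw [List.mem_flatMap] at hx hy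
        obtain ⟨t1, _, hx⟩ := hx
        obtain ⟨t2, _, hy⟩ := hy
        obtain ⟨rx, rfl⟩ := mem_branch_shape hx
        obtain ⟨ry, rfl⟩ := mem_branch_shape hy
        rw [keyB_cons, keyB_cons]
        refine List.cons_lt_cons_iff.mpr (Or.inl ?_)
        have h1 := ite_L_bounds t1
        have h2 := ite_L_bounds t2
        simp only
        omega

theorem sum_nonneg_of_lo {lo : Int} (hlo : 1 ≤ lo) (l : List Int) (h : ∀ p ∈ l, lo ≤ p) :
    0 ≤ l.sum :=
  List.sum_nonneg (fun x hx => le_trans (by omega) (h x hx))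

theorem mem_rowP (b : Int) (hb : 1 ≤ b) :
    ∀ (n : Nat) (x : List Int) (m : Int), m.toNat = n →
      (x ∈ rowP b m ↔ x.sum = m ∧ (∀ p ∈ x, b + 1 ≤ p) ∧ List.IsChain (fun a c => c ≤ a) x) := by
  intro n
  induction n using Nat.strong_induction_on with
  | _ n IH =>
    intro x m hn
    rw [rowP_eq b m hb]
    by_cases hm : m = 0
    · subst hm
      rw [if_pos rfl]
      constructor
      · intro hx
        rw [List.mem_singleton] at hx
        subst hx
        exact ⟨rfl, by simp, by simp⟩
      · rintro ⟨hs, hge, _⟩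
        rw [List.mem_singleton]
        cases x with
        | nil => rfl
        | cons p rest =>
          exfalso
          have h1 : b + 1 ≤ p := hge p (by simp)
          have h2 : 0 ≤ rest.sum :=
            sum_nonneg_of_lo (lo := b + 1) (by omega) rest (fun q hq => hge q (by simp [hq]))
          simp only [List.sum_cons] at hs
          omega
    · rw [if_neg hm]
      simp only [List.mem_flatMap, List.mem_map, List.mem_filter,
        PySem.List.mem_pyRange_neg_one]
      constructor
      · rintro ⟨p, ⟨hp1, hp2⟩, rest, ⟨hrest, hcond⟩, rfl⟩
        obtain ⟨hs, hge, hch⟩ := (IH (m - p).toNat (by omega) rest (m - p) rfl).mp hrest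
        refine ⟨by rw [List.sum_cons, hs]; omega, ?_, ?_⟩
        · intro q hq
          rcases List.mem_cons.mp hq with h | h
          · omega
          · exact hge q h
        · cases rest with
          | nil => simp
          | cons y t =>
            simp only [pvNotOrLe, decide_eq_true_eq] at hcond
            exact List.isChain_cons_cons.mpr ⟨hcond, hch⟩
      · rintro ⟨hs, hge, hch⟩
        cases x with
        | nil =>
          exfalso; simp at hs; omega
        | cons p rest =>
          have hp : b + 1 ≤ p := hge p (by simp)
          have hrge : ∀ q ∈ rest, b + 1 ≤ q := fun q hq => hge q (by simp [hq])
          have hrs : 0 ≤ rest.sum := sum_nonneg_of_lo (lo := b + 1) (by omega) rest hrge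
          simp only [List.sum_cons] at hs
          refine ⟨p, ⟨by omega, by omega⟩, rest, ?_, rfl⟩
          refine ⟨(IH (m - p).toNat (by omega) rest (m - p) rfl).mpr
            ⟨by omega, hrge, ?_⟩, ?_⟩
          · cases rest with
            | nil => simp
            | cons y t => exact (List.isChain_cons_cons.mp hch).2
          · cases rest with
            | nil => rfl
            | cons y t =>
              simp only [pvNotOrLe, decide_eq_true_eq]
              exact (List.isChain_cons_cons.mp hch).1

theorem nodup_flatMap' {α β : Type} (l : List α) (f : α → List β) (h0 : l.Nodup)
    (h1 : ∀ a ∈ l, (f a).Nodup)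
    (h2 : ∀ a1 ∈ l, ∀ a2 ∈ l, ∀ b, b ∈ f a1 → b ∈ f a2 → a1 = a2) :
    (l.flatMap f).Nodup := by
  induction l with
  | nil => simp
  | cons a t ih =>
    rw [List.flatMap_cons, List.nodup_append']
    refine ⟨h1 a (by simp), ?_, ?_⟩
    · exact ih (List.nodup_cons.mp h0).2 (fun x hx => h1 x (by simp [hx]))
        (fun x hx y hy => h2 x (by simp [hx]) y (by simp [hy]))
    · intro b hb hb2
      rw [List.mem_flatMap] at hb2
      obtain ⟨a', ha', hba'⟩ := hb2
      have := h2 a (by simp) a' (by simp [ha']) b hb hba'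
      exact (List.nodup_cons.mp h0).1 (this ▸ ha')

theorem nodup_pyRange_neg_one (a b : Int) : (PySem.List.pyRange a b (-1)).Nodup := by
  rw [PySem.List.pyRange_neg_one]
  exact List.Nodup.map (fun x y hxy => by omega) List.nodup_range

theorem nodup_rowP (b : Int) (hb : 1 ≤ b) :
    ∀ (n : Nat) (m : Int), m.toNat = n → (rowP b m).Nodup := by
  intro n
  induction n using Nat.strong_induction_on with
  | _ n IH =>
    intro m hn
    rw [rowP_eq b m hb]
    by_cases hm : m = 0
    · rw [if_pos hm]; simp
    · rw [if_neg hm]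
      apply nodup_flatMap'
      · exact nodup_pyRange_neg_one _ _
      · intro p hp
        rw [PySem.List.mem_pyRange_neg_one] at hp
        exact List.Nodup.map (fun x y hxy => by injection hxy)
          (List.Nodup.filter _ (IH (m - p).toNat (by omega) (m - p) rfl))
      · intro p1 _ p2 _ c hc1 hc2
        rw [List.mem_map] at hc1 hc2
        obtain ⟨r1, _, hr1⟩ := hc1
        obtain ⟨r2, _, hr2⟩ := hc2
        rw [← hr2] at hr1
        injection hr1

def mkS (wp lp : List Int) : List (String × Int) :=
  wp.map (fun l => ("W", l)) ++ lp.map (fun l => ("L", l))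

def GoodS (h : Int) (s : List (String × Int)) : Prop :=
  ∃ wp lp, s = mkS wp lp ∧ wp.sum + lp.sum = h ∧
    (∀ p ∈ wp, (3:Int) ≤ p) ∧ List.IsChain (fun a b => b ≤ a) wp ∧
    (∀ p ∈ lp, (2:Int) ≤ p) ∧ List.IsChain (fun a b => b ≤ a) lp ∧
    (∀ w lh, wp.getLast? = some w → lp.head? = some lh → lh ≤ w)

theorem pyPairGt_LL (a b : Int) : pyPairGt ("L", a) ("L", b) = decide (b < a) := by
  simp [pyPairGt]

theorem pyPairGt_LW (a b : Int) : pyPairGt ("L", a) ("W", b) = false := by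
  simp [pyPairGt]
  decide

theorem pyPairGt_WW (a b : Int) : pyPairGt ("W", a) ("W", b) = decide (b < a) := by
  simp [pyPairGt]

theorem pyPairGt_WL (a b : Int) : pyPairGt ("W", a) ("L", b) = true := by
  simp [pyPairGt]
  decide

theorem chain_cons_of {hi : Int} {l : List Int} (hch : List.IsChain (fun a b => b ≤ a) l)
    (hhead : ∀ x, l.head? = some x → x ≤ hi) : List.IsChain (fun a b => b ≤ a) (hi :: l) := by
  cases l with
  | nil => exact List.IsChain.singleton hi
  | cons x t => exact List.isChain_cons_cons.mpr ⟨hhead x rfl, hch⟩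

theorem head_le_sum {l : List Int} {x : Int} (h0 : ∀ p ∈ l, 0 ≤ p)
    (hx : l.head? = some x) : x ≤ l.sum := by
  cases l with
  | nil => simp at hx
  | cons y t =>
    rw [List.head?_cons, Option.some.injEq] at hx
    subst hx
    have : 0 ≤ t.sum := List.sum_nonneg (fun q hq => h0 q (by simp [hq]))
    rw [List.sum_cons]
    omega

theorem mkS_nil (lp : List Int) : mkS [] lp = lp.map (fun l => ("L", l)) := rfl

theorem mkS_cons (w : Int) (wp lp : List Int) : mkS (w :: wp) lp = ("W", w) :: mkS wp lp := rfl

theorem validA_of_L : ∀ (lp : List Int), (∀ p ∈ lp, (2:Int) ≤ p) →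
    List.IsChain (fun a b => b ≤ a) lp →
    ∀ cap : Option (String × Int),
      (∀ c lh, cap = some c → lp.head? = some lh → lh ≤ c.2 ∧ pyPairGt ("L", lh) c = false) →
      ValidA cap lp.sum (lp.map (fun l => ("L", l))) := by
  intro lp
  induction lp with
  | nil => intro _ _ cap _; exact ValidA.nil cap
  | cons l rest ih =>
    intro h2 hch cap hcap
    have hrest2 : ∀ p ∈ rest, (2:Int) ≤ p := fun p hp => h2 p (by simp [hp])
    have hrs : 0 ≤ rest.sum := sum_nonneg_of_lo (by omega) rest hrest2
    have hsub : (l :: rest).sum - l = rest.sum := by rw [List.sum_cons]; omega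
    rw [List.map_cons]
    refine ValidA.cons cap _ ("L", l) _
      ⟨h2 l (by simp), by rw [List.sum_cons]; omega, Or.inr rfl, fun c hc => hcap c l hc rfl⟩ ?_
    rw [hsub]
    refine ih hrest2 (List.IsChain.of_cons hch) (some ("L", l)) ?_
    rintro c lh hc hlh
    injection hc with hc
    subst hc
    have hle : lh ≤ l := by
      cases rest with
      | nil => simp at hlh
      | cons y t =>
        rw [List.head?_cons, Option.some.injEq] at hlh
        subst hlh
        exact (List.isChain_cons_cons.mp hch).1
    exact ⟨hle, by rw [pyPairGt_LL]; simpa using hle⟩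

theorem validA_of_mk : ∀ (wp lp : List Int), (∀ p ∈ wp, (3:Int) ≤ p) →
    List.IsChain (fun a b => b ≤ a) wp →
    (∀ p ∈ lp, (2:Int) ≤ p) → List.IsChain (fun a b => b ≤ a) lp →
    (∀ w lh, wp.getLast? = some w → lp.head? = some lh → lh ≤ w) →
    ∀ cap : Option (String × Int),
      (∀ c q, cap = some c → (mkS wp lp).head? = some q → q.2 ≤ c.2 ∧ pyPairGt q c = false) →
      ValidA cap (wp.sum + lp.sum) (mkS wp lp) := by
  intro wp
  induction wp with
  | nil =>
    intro lp _ _ h2 hcl _ cap hcap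
    rw [mkS_nil, List.sum_nil, zero_add]
    refine validA_of_L lp h2 hcl cap ?_
    intro c lh hc hlh
    refine hcap c ("L", lh) hc ?_
    rw [mkS_nil]
    cases lp with
    | nil => simp at hlh
    | cons y t =>
      rw [List.head?_cons, Option.some.injEq] at hlh
      subst hlh
      rfl
  | cons w wp' ih =>
    intro lp h3 hcw h2 hcl hb cap hcap
    have h3' : ∀ p ∈ wp', (3:Int) ≤ p := fun p hp => h3 p (by simp [hp])
    have hws : 0 ≤ wp'.sum := sum_nonneg_of_lo (by omega) wp' h3'
    have hls : 0 ≤ lp.sum := sum_nonneg_of_lo (by omega) lp h2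
    have hsub : ((w :: wp').sum + lp.sum) - w = wp'.sum + lp.sum := by rw [List.sum_cons]; omega
    rw [mkS_cons]
    refine ValidA.cons cap _ ("W", w) _
      ⟨by have := h3 w (by simp); omega, by rw [List.sum_cons]; omega, Or.inl ⟨rfl, h3 w (by simp)⟩,
        fun c hc => hcap c ("W", w) hc (by rw [mkS_cons]; rfl)⟩ ?_
    rw [hsub]
    refine ih lp h3' (List.IsChain.of_cons hcw) h2 hcl ?_ (some ("W", w)) ?_
    · intro w' lh hw' hlh
      cases wp' with
      | nil => simp at hw'
      | cons y t => exact hb w' lh (by rw [List.getLast?_cons_cons]; exact hw') hlh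
    · rintro c q hc hq
      injection hc with hc
      subst hc
      cases wp' with
      | nil =>
        rw [mkS_nil] at hq
        cases lp with
        | nil => simp at hq
        | cons lh t =>
          rw [List.map_cons, List.head?_cons, Option.some.injEq] at hq
          subst hq
          have hle : lh ≤ w := hb w lh rfl rfl
          exact ⟨hle, by rw [pyPairGt_LW]⟩
      | cons w' t =>
        rw [mkS_cons, List.head?_cons, Option.some.injEq] at hq
        subst hq
        have hle : w' ≤ w := (List.isChain_cons_cons.mp hcw).1
        exact ⟨hle, by rw [pyPairGt_WW]; simpa using hle⟩

theorem validA_head_constraint {p : String × Int} {r : Int} {s : List (String × Int)}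
    (hv : ValidA (some p) r s) :
    ∀ q, s.head? = some q → q.2 ≤ p.2 ∧ pyPairGt q p = false := by
  intro q hq
  cases hv with
  | nil => simp at hq
  | cons _ _ p' s' hok _ =>
    rw [List.head?_cons, Option.some.injEq] at hq
    subst hq
    exact hok.2.2.2 p rfl

theorem validA_decomp : ∀ (s : List (String × Int)) (cap : Option (String × Int)) (r : Int),
    ValidA cap r s →
    ∃ wp lp, s = mkS wp lp ∧ wp.sum + lp.sum = r ∧
      (∀ p ∈ wp, (3:Int) ≤ p) ∧ List.IsChain (fun a b => b ≤ a) wp ∧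
      (∀ p ∈ lp, (2:Int) ≤ p) ∧ List.IsChain (fun a b => b ≤ a) lp ∧
      (∀ w lh, wp.getLast? = some w → lp.head? = some lh → lh ≤ w) := by
  intro s
  induction s with
  | nil =>
    intro cap r hv
    refine ⟨[], [], rfl, ?_, by simp, by simp, by simp, by simp, by simp⟩
    cases hv with
    | nil => simp
  | cons p s' ih =>
    intro cap r hv
    cases hv with
    | cons _ _ _ _ hok hv' =>
      obtain ⟨wp', lp', rfl, hsum, h3, hcw, h2, hcl, hb⟩ := ih (some p) (r - p.2) hv'
      obtain ⟨hp2, hpr, hty, _⟩ := hok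
      rcases hty with ⟨hw, h3p⟩ | hl
      · -- p is a W mode
        have hpeq : p = ("W", p.2) := by rw [← hw]
        refine ⟨p.2 :: wp', lp', by rw [mkS_cons, ← hpeq], by rw [List.sum_cons]; omega,
          ?_, ?_, h2, hcl, ?_⟩
        · intro x hx
          rcases List.mem_cons.mp hx with h | h
          · omega
          · exact h3 x h
        · refine chain_cons_of hcw ?_
          intro x hx
          cases wp' with
          | nil => simp at hx
          | cons y t =>
            rw [List.head?_cons, Option.some.injEq] at hx
            have hy : y ≤ p.2 := (validA_head_constraint hv' ("W", y) (by rw [mkS_cons]; rfl)).1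
            omega
        · intro w lh hw' hlh
          cases wp' with
          | nil =>
            rw [List.getLast?_singleton, Option.some.injEq] at hw'
            subst hw'
            rw [mkS_nil] at hv'
            cases lp' with
            | nil => simp at hlh
            | cons y t =>
              rw [List.head?_cons, Option.some.injEq] at hlh
              have hy : y ≤ p.2 := (validA_head_constraint hv' ("L", y) (by rfl)).1
              omega
          | cons y t =>
            rw [List.getLast?_cons_cons] at hw'
            exact hb w lh hw' hlh
      · -- p is an L mode: then no W modes may follow, and none precede in s'
        have hpeq : p = ("L", p.2) := by rw [← hl]
        have hwp' : wp' = [] := by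
          cases wp' with
          | nil => rfl
          | cons y t =>
            exfalso
            have := validA_head_constraint hv' ("W", y) (by rw [mkS_cons]; rfl)
            rw [hpeq] at this
            rw [pyPairGt_WL] at this
            exact absurd this.2 (by simp)
        subst hwp'
        refine ⟨[], p.2 :: lp', by rw [hpeq]; rfl, by simp at hsum ⊢; omega,
          by simp, by simp, ?_, ?_, by simp⟩
        · intro x hx
          rcases List.mem_cons.mp hx with h | h
          · omega
          · exact h2 x h
        · refine chain_cons_of hcl ?_
          intro x hx
          cases lp' with
          | nil => simp at hx
          | cons y t =>
            rw [List.head?_cons, Option.some.injEq] at hx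
            have hy : y ≤ p.2 := (validA_head_constraint hv' ("L", y) (by rfl)).1
            omega

theorem validA_iff_good (h : Int) (s : List (String × Int)) : ValidA none h s ↔ GoodS h s := by
  constructor
  · intro hv
    exact validA_decomp s none h hv
  · rintro ⟨wp, lp, rfl, hsum, h3, hcw, h2, hcl, hb⟩
    have := validA_of_mk wp lp h3 hcw h2 hcl hb none (by simp)
    rwa [hsum] at this

theorem pvTablesB_succ (m : Int) (hm : 0 ≤ m) :
    pvTablesB (m + 1) =
      (fun (t : List (List (List Int)) × List (List (List Int))) n =>
        ((t.1 ++ [(PySem.List.pyRange n 2 (-1)).flatMap (fun p =>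
            ((PySem.List.pyGetD t.1 (n - p) []).filter (pvNotOrLe p)).map
              (fun rest => p :: rest))]),
         (t.2 ++ [(PySem.List.pyRange n 1 (-1)).flatMap (fun p =>
            ((PySem.List.pyGetD t.2 (n - p) []).filter (pvNotOrLe p)).map
              (fun rest => p :: rest))])))
        (pvTablesB m) (m + 1) := by
  unfold pvTablesB
  rw [PySem.List.pyRange_one_append 1 (m + 1) (m + 1 + 1) (by omega) (by omega),
    PySem.List.pyRange_one_singleton, List.foldl_append]
  rfl

theorem rowP_zero (b : Int) (hb : 1 ≤ b) : rowP b 0 = [[]] := by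
  rw [rowP_eq b 0 hb, if_pos rfl]

theorem tables_spec : ∀ (k : Nat), pvTablesB (k : Int) =
    ((PySem.List.pyRange 0 ((k : Int) + 1) 1).map (fun i => rowP 2 i),
     (PySem.List.pyRange 0 ((k : Int) + 1) 1).map (fun i => rowP 1 i)) := by
  intro k
  induction k with
  | zero =>
    show pvTablesB 0 = _
    unfold pvTablesB
    rw [PySem.List.pyRange_one_eq_nil (by omega)]
    rw [show ((0:Nat):Int) + 1 = 0 + 1 by omega, PySem.List.pyRange_one_singleton]
    simp [rowP_zero 2 (by omega), rowP_zero 1 (by omega)]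
  | succ k ih =>
    have hcast : ((k + 1 : Nat) : Int) = (k : Int) + 1 := by push_cast; ring
    rw [hcast, pvTablesB_succ (k : Int) (by omega), ih]
    have hrow : ∀ (b : Int), 1 ≤ b →
        ((PySem.List.pyRange ((k : Int) + 1) b (-1)).flatMap (fun p =>
          ((PySem.List.pyGetD ((PySem.List.pyRange 0 ((k : Int) + 1) 1).map (fun i => rowP b i))
              ((k : Int) + 1 - p) []).filter (pvNotOrLe p)).map
            (fun rest => p :: rest))) = rowP b ((k : Int) + 1) := by
      intro b hb
      rw [rowP_eq b ((k : Int) + 1) hb, if_neg (by omega)]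
      apply List.flatMap_congr
      intro p hp
      rw [PySem.List.mem_pyRange_neg_one] at hp
      rw [PySem.List.pyGetD_map_pyRange_of_nonneg _ _ _ _ (by omega) (by omega)]
    rw [show ((k : Int) + 1 + 1) = ((k : Int) + 1) + 1 by ring,
      PySem.List.pyRange_one_succ_right (by omega : (0:Int) ≤ (k : Int) + 1)]
    simp only [List.map_append, List.map_cons, List.map_nil]
    exact Prod.ext (by rw [hrow 2 (by omega)]) (by rw [hrow 1 (by omega)])

-- proof-side form of the port's states list
def statesB (h : Int) : List (List (String × Int)) :=
  (PySem.List.pyRange 0 (h + 1) 1).flatMap (fun a =>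
    (rowP 2 a).flatMap (fun wp =>
      ((rowP 1 (h - a)).filter
        (pvNotOrLe (match wp.getLast? with | some w => w | none => h - a))).map
        (fun lp => wp.map (fun l => ("W", l)) ++ lp.map (fun l => ("L", l)))))

theorem states_port_eq (h : Int) : pvStatesPortB h = statesB h := by
  unfold pvStatesPortB statesB
  apply List.flatMap_congr
  intro a ha
  rw [PySem.List.mem_pyRange_one] at ha
  have hml : h ≤ max h 0 := le_max_left h 0
  have hmr : (0:Int) ≤ max h 0 := le_max_right h 0
  have hmax : max h 0 = (((max h 0).toNat : Nat) : Int) := by omega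
  rw [hmax, tables_spec (max h 0).toNat]
  dsimp only
  rw [PySem.List.pyGetD_map_pyRange_of_nonneg _ _ _ _ (by omega) (by omega),
    PySem.List.pyGetD_map_pyRange_of_nonneg _ _ _ _ (by omega) (by omega)]

theorem mem_statesB (h : Int) (s : List (String × Int)) : s ∈ statesB h ↔ GoodS h s := by
  unfold statesB
  simp only [List.mem_flatMap, List.mem_map, List.mem_filter, PySem.List.mem_pyRange_one]
  constructor
  · rintro ⟨a, ⟨ha0, hah⟩, wp, hwp, lp, ⟨hlp, hcond⟩, rfl⟩
    obtain ⟨hws, hw3, hwc⟩ := (mem_rowP 2 (by omega) a.toNat wp a rfl).mp hwp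
    obtain ⟨hls, hl2, hlc⟩ := (mem_rowP 1 (by omega) (h - a).toNat lp (h - a) rfl).mp hlp
    refine ⟨wp, lp, rfl, by omega, fun p hp => by have := hw3 p hp; omega, hwc,
      fun p hp => by have := hl2 p hp; omega, hlc, ?_⟩
    intro w lh hw hlh
    cases lp with
    | nil => simp at hlh
    | cons y t =>
      rw [List.head?_cons, Option.some.injEq] at hlh
      simp only [pvNotOrLe, hw, decide_eq_true_eq] at hcond
      omega
  · rintro ⟨wp, lp, rfl, hsum, h3, hcw, h2, hcl, hb⟩
    have hws0 : 0 ≤ wp.sum := sum_nonneg_of_lo (lo := 3) (by omega) wp h3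
    have hls0 : 0 ≤ lp.sum := sum_nonneg_of_lo (lo := 2) (by omega) lp h2
    refine ⟨wp.sum, ⟨by omega, by omega⟩, wp, ?_, lp, ⟨?_, ?_⟩, rfl⟩
    · exact (mem_rowP 2 (by omega) wp.sum.toNat wp wp.sum rfl).mpr
        ⟨rfl, fun p hp => by have := h3 p hp; omega, hcw⟩
    · exact (mem_rowP 1 (by omega) (h - wp.sum).toNat lp (h - wp.sum) rfl).mpr
        ⟨by omega, fun p hp => by have := h2 p hp; omega, hcl⟩
    · cases lp with
      | nil => rfl
      | cons y t =>
        simp only [pvNotOrLe, decide_eq_true_eq]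
        cases hgl : wp.getLast? with
        | some w =>
          exact hb w y hgl rfl
        | none =>
          have hwnil : wp = [] := List.getLast?_eq_none_iff.mp hgl
          subst hwnil
          have hxs := head_le_sum (l := y :: t) (fun p hp => by have := h2 p hp; omega) rfl
          simp only [List.sum_nil] at hsum ⊢
          omega

theorem mkS_inj : ∀ (wp1 lp1 wp2 lp2 : List Int), mkS wp1 lp1 = mkS wp2 lp2 →
    wp1 = wp2 ∧ lp1 = lp2 := by
  have hLW : (("L", (0:Int)).1 = "W") = False := by simp
  intro wp1
  induction wp1 with
  | nil =>
    intro lp1 wp2 lp2 heq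
    cases wp2 with
    | nil =>
      refine ⟨rfl, ?_⟩
      rw [mkS_nil, mkS_nil] at heq
      exact (List.map_injective_iff.mpr (fun a b hab => by injection hab)) heq
    | cons w t =>
      exfalso
      rw [mkS_nil, mkS_cons] at heq
      cases lp1 with
      | nil => simp at heq
      | cons y t1 =>
        rw [List.map_cons] at heq
        injection heq with h1 _
        injection h1 with hLW' _
        exact absurd hLW' (by decide)
  | cons w1 t1 ih =>
    intro lp1 wp2 lp2 heq
    cases wp2 with
    | nil =>
      exfalso
      rw [mkS_nil, mkS_cons] at heq
      cases lp2 with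
      | nil => simp at heq
      | cons y t2 =>
        rw [List.map_cons] at heq
        injection heq with h1 _
        injection h1 with hLW' _
        exact absurd hLW' (by decide)
    | cons w2 t2 =>
      rw [mkS_cons, mkS_cons] at heq
      injection heq with h1 h2
      injection h1 with _ hw
      obtain ⟨ht, hl⟩ := ih lp1 t2 lp2 h2
      exact ⟨by rw [hw, ht], hl⟩

theorem sum_of_mem_rowP {x : List Int} {m b : Int} (hb : 1 ≤ b)
    (hx : x ∈ rowP b m) : x.sum = m :=
  ((mem_rowP b hb m.toNat x m rfl).mp hx).1

theorem nodup_statesB (h : Int) : (statesB h).Nodup := by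
  unfold statesB
  apply nodup_flatMap'
  · exact PySem.List.nodup_pyRange_one 0 (h + 1)
  · intro a _
    apply nodup_flatMap'
    · exact nodup_rowP 2 (by omega) a.toNat a rfl
    · intro wp _
      refine List.Nodup.map ?_ (List.Nodup.filter _ (nodup_rowP 1 (by omega) (h - a).toNat (h - a) rfl))
      intro x y hxy
      exact (mkS_inj wp x wp y hxy).2
    · intro wp1 _ wp2 _ b hb1 hb2
      rw [List.mem_map] at hb1 hb2
      obtain ⟨lp1, _, rfl⟩ := hb1
      obtain ⟨lp2, _, heq⟩ := hb2
      exact ((mkS_inj wp2 lp2 wp1 lp1 heq).1).symm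
  · intro a1 _ a2 _ b hb1 hb2
    rw [List.mem_flatMap] at hb1 hb2
    obtain ⟨wp1, hwp1, hb1⟩ := hb1
    obtain ⟨wp2, hwp2, hb2⟩ := hb2
    rw [List.mem_map] at hb1 hb2
    obtain ⟨lp1, _, rfl⟩ := hb1
    obtain ⟨lp2, _, heq⟩ := hb2
    have hw := (mkS_inj wp2 lp2 wp1 lp1 heq).1
    have hs1 := sum_of_mem_rowP (by omega) hwp1
    have hs2 := sum_of_mem_rowP (by omega) hwp2
    rw [← hs1, ← hs2, hw]

theorem nodup_genA (h : Int) : (genA h none).Nodup := by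
  refine List.Pairwise.imp ?_ (genA_pairwise h.toNat h rfl none)
  intro a b hlt heq
  subst heq
  exact lt_irrefl _ hlt

theorem sorted_statesB (h : Int) : PySem.List.sorted (statesB h) keyB false = genA h none := by
  have hperm : (genA h none).Perm (statesB h) := by
    rw [List.perm_ext_iff_of_nodup (nodup_genA h) (nodup_statesB h)]
    intro s
    rw [mem_genA h.toNat h rfl none s, mem_statesB h s, validA_iff_good]
  have := PySem.List.sorted_eq_of_perm_of_pairwise_lt (statesB h) (genA h none) keyB hperm
    (genA_pairwise h.toNat h rfl none)
  convert this using 2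

-- ===== VERDICT (by name: the statement is the Claim_ definition above) =====
theorem w3_states_at_weight_py_spec : Claim_equal_w3_states_at_weight_py := by
  intro h_ _
  unfold Spec_w3_states_at_weight_py w3_states_at_weight_py w3_states_at_weight_py_alt
  rw [states_port_eq, sorted_statesB]
  rw [PySem.List.foldl_append_singleton_eq_map]
  apply List.map_congr_left
  intro s _
  simp only [ne_eq, List.map_eq_nil_iff]
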